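-- pv_equiv track=rewrite | github.com/mysterI0s/readme-generator | src/utils.py | detect_framework
-- ===== SOURCE A (Python) =====
-- from typing import Optional
--
-- def detect_framework(files: list, file_contents: dict) -> Optional[str]:
--     """Detect the framework used based on files and content."""
--     filenames = {f.lower() for f in files}
--
--     # Check for specific files
--     if "package.json" in filenames:
--         # Check package.json content for React/Vue/Angular
--         package_content = file_contents.get("package.json", "")
--         if "react" in package_content.lower():
--             return "React"
--         elif "vue" in package_content.lower():
--             return "Vue.js"
--         elif "angular" in package_content.lower():
--             return "Angular"
--         elif "@nestjs" in package_content.lower():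
--             return "NestJS"
--         return "Node.js"
--
--     if "requirements.txt" in filenames or "pyproject.toml" in filenames:
--         # Check Python dependencies
--         reqs_content = file_contents.get("requirements.txt", "") + file_contents.get(
--             "pyproject.toml", ""
--         )
--
--         if "django" in reqs_content.lower():
--             return "Django"
--         elif "flask" in reqs_content.lower():
--             return "Flask"
--         elif "fastapi" in reqs_content.lower():
--             return "FastAPI"
--         elif "streamlit" in reqs_content.lower():
--             return "Streamlit"
--         return "Python"
--
--     if "cargo.toml" in filenames:
--         return "Rust"
--
--     if "go.mod" in filenames:
--         return "Go"
--
--     if "pom.xml" in filenames or "build.gradle" in filenames: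
--         return "Java"
--
--     return None
-- ===== SOURCE B (Python) =====
-- from typing import Optional
--
-- # priority of each trigger filename (lower number = checked earlier by the spec)
-- _PRIORITY = {
--     "package.json": 0,
--     "requirements.txt": 1, "pyproject.toml": 1,
--     "cargo.toml": 2,
--     "go.mod": 3,
--     "pom.xml": 4, "build.gradle": 4,
-- }
--
-- # per-priority content rules: (source keys, markers, framework names, fallback)
-- _RULES = {
--     0: (["package.json"],
--         ["react", "vue", "angular", "@nestjs"],
--         ["React", "Vue.js", "Angular", "NestJS"], "Node.js"),
--     1: (["requirements.txt", "pyproject.toml"],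
--         ["django", "flask", "fastapi", "streamlit"],
--         ["Django", "Flask", "FastAPI", "Streamlit"], "Python"),
-- }
--
--
-- def detect_framework(files: list, file_contents: dict) -> Optional[str]:
--     """Detect the framework used based on files and content."""
--     best = min((_PRIORITY[f] for f in (g.lower() for g in files) if f in _PRIORITY),
--                default=None)
--     if best is None:
--         return None
--     if best >= 2:
--         return ["Rust", "Go", "Java"][best - 2]
--     sources, markers, names, fallback = _RULES[best]
--     text = "".join(file_contents.get(k, "") for k in sources).lower()
--     hits = [i for i, m in enumerate(markers) if m in text]
--     return names[min(hits)] if hits else fallback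
-- ===== Notes on version B (the rewrite author's own statement) =====
-- stated objective: alternative
-- what changed: Replaced A's ordered if/elif membership cascade by an argmin computation: one pass maps each lowercased filename to a numeric priority and takes the minimum to pick the branch, and the content scan collects all marker hits and returns the one with the smallest index instead of short-circuiting in order.
import Mathlib
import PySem

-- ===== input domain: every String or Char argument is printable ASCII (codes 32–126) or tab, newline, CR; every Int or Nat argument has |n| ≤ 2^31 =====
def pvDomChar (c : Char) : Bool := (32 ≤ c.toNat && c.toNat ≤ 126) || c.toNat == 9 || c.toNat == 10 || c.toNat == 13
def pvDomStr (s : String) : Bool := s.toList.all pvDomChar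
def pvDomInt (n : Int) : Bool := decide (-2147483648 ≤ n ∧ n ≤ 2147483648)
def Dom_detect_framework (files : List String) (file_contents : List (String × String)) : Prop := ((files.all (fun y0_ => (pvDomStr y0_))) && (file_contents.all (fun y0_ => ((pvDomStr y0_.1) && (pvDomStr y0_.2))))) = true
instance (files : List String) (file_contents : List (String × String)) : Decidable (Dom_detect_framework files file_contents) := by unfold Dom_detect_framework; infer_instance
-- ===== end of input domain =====

-- B replaces A's ordered if/elif membership cascade by an argmin computation: one pass maps each
-- filename to a numeric priority and takes the minimum, and the content scan collects ALL marker
-- hits and returns the one with the smallest index (objective: alternative).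

-- ===== PORT A =====
def detect_framework (files : List String) (file_contents : List (String × String)) : Option String :=
  let filenames : PySem.Set String := PySem.Set.ofList (files.map PySem.Str.lower)
  if PySem.Set.contains filenames "package.json" then
    let package_content := (PySem.Dict.mk file_contents).getD "package.json" ""
    if PySem.Str.isIn "react" (PySem.Str.lower package_content) then some "React"
    else if PySem.Str.isIn "vue" (PySem.Str.lower package_content) then some "Vue.js"
    else if PySem.Str.isIn "angular" (PySem.Str.lower package_content) then some "Angular"
    else if PySem.Str.isIn "@nestjs" (PySem.Str.lower package_content) then some "NestJS"
    else some "Node.js"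
  else if PySem.Set.contains filenames "requirements.txt" || PySem.Set.contains filenames "pyproject.toml" then
    let reqs_content := (PySem.Dict.mk file_contents).getD "requirements.txt" ""
      ++ (PySem.Dict.mk file_contents).getD "pyproject.toml" ""
    if PySem.Str.isIn "django" (PySem.Str.lower reqs_content) then some "Django"
    else if PySem.Str.isIn "flask" (PySem.Str.lower reqs_content) then some "Flask"
    else if PySem.Str.isIn "fastapi" (PySem.Str.lower reqs_content) then some "FastAPI"
    else if PySem.Str.isIn "streamlit" (PySem.Str.lower reqs_content) then some "Streamlit"
    else some "Python"
  else if PySem.Set.contains filenames "cargo.toml" then some "Rust"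
  else if PySem.Set.contains filenames "go.mod" then some "Go"
  else if PySem.Set.contains filenames "pom.xml" || PySem.Set.contains filenames "build.gradle" then some "Java"
  else none

-- ===== PORT B =====
-- the _PRIORITY dict of Source B
def pvPriority : PySem.Dict String Int :=
  PySem.Dict.ofList [("package.json", 0), ("requirements.txt", 1), ("pyproject.toml", 1),
    ("cargo.toml", 2), ("go.mod", 3), ("pom.xml", 4), ("build.gradle", 4)]

-- the _RULES dict of Source B (only keys 0 and 1 exist; looked up only with best ∈ {0, 1})
def pvRules (best : Int) : List String × List String × List String × String :=
  if best = 0 then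
    (["package.json"], ["react", "vue", "angular", "@nestjs"],
     ["React", "Vue.js", "Angular", "NestJS"], "Node.js")
  else
    (["requirements.txt", "pyproject.toml"], ["django", "flask", "fastapi", "streamlit"],
     ["Django", "Flask", "FastAPI", "Streamlit"], "Python")

def detect_framework_alt (files : List String) (file_contents : List (String × String)) : Option String :=
  let prios := (files.map PySem.Str.lower).filterMap (fun g => PySem.Dict.get? pvPriority g)
  match PySem.List.min? prios (fun x => x) with
  | none => none
  | some best =>
    if 2 ≤ best then PySem.List.pyGet? ["Rust", "Go", "Java"] (best - 2)
    else
      let r := pvRules best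
      let text := PySem.Str.lower
        ((r.1.map (fun k => (PySem.Dict.mk file_contents).getD k "")).foldr (· ++ ·) "")
      let hits := ((PySem.List.enumerate r.2.1).filter
        (fun im => PySem.Str.isIn im.2 text)).map (·.1)
      match PySem.List.min? hits (fun x => x) with
      | some i => PySem.List.pyGet? r.2.2.1 i
      | none => some r.2.2.2

-- ===== PRECONDITION & SPEC =====
def Spec_detect_framework (files : List String) (file_contents : List (String × String)) (out : Option String) : Prop := out = detect_framework_alt files file_contents
instance (files : List String) (file_contents : List (String × String)) (out : Option String) : Decidable (Spec_detect_framework files file_contents out) := by unfold Spec_detect_framework; infer_instance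

-- ===== CLAIM (what is proved, stated in full; the proofs are below) =====
def Claim_equal_detect_framework : Prop := ∀ (files : List String) (file_contents : List (String × String)), Dom_detect_framework files file_contents → Spec_detect_framework files file_contents (detect_framework files file_contents)

-- ===== LEMMAS AND PROOFS =====

-- get? on the literal priority dict, characterized
theorem pvPriority_get? (f : String) (p : Int) : PySem.Dict.get? pvPriority f = some p ↔
    (f = "package.json" ∧ p = 0) ∨ ((f = "requirements.txt" ∨ f = "pyproject.toml") ∧ p = 1) ∨
    (f = "cargo.toml" ∧ p = 2) ∨ (f = "go.mod" ∧ p = 3) ∨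
    ((f = "pom.xml" ∨ f = "build.gradle") ∧ p = 4) := by
  have h : pvPriority = PySem.Dict.mk [("package.json", 0), ("requirements.txt", 1),
      ("pyproject.toml", 1), ("cargo.toml", 2), ("go.mod", 3), ("pom.xml", 4),
      ("build.gradle", 4)] := by decide
  rw [h]
  simp [PySem.Dict.get?_mk_cons]
  by_cases h1 : f = "package.json" <;> by_cases h2 : f = "requirements.txt" <;>
    by_cases h3 : f = "pyproject.toml" <;> by_cases h4 : f = "cargo.toml" <;>
    by_cases h5 : f = "go.mod" <;> by_cases h6 : f = "pom.xml" <;> by_cases h7 : f = "build.gradle" <;>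
    simp_all [PySem.Dict.get?, eq_comm]

-- membership in B's priority list, characterized by which trigger filenames occur
theorem pvPrios_mem (fl : List String) (p : Int) :
    p ∈ fl.filterMap (fun g => PySem.Dict.get? pvPriority g) ↔
    (p = 0 ∧ "package.json" ∈ fl) ∨
    (p = 1 ∧ ("requirements.txt" ∈ fl ∨ "pyproject.toml" ∈ fl)) ∨
    (p = 2 ∧ "cargo.toml" ∈ fl) ∨ (p = 3 ∧ "go.mod" ∈ fl) ∨
    (p = 4 ∧ ("pom.xml" ∈ fl ∨ "build.gradle" ∈ fl)) := by
  simp only [List.mem_filterMap, pvPriority_get?]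
  constructor
  · rintro ⟨g, hg, h⟩
    rcases h with ⟨rfl, rfl⟩ | ⟨(rfl | rfl), rfl⟩ | ⟨rfl, rfl⟩ | ⟨rfl, rfl⟩ | ⟨(rfl | rfl), rfl⟩ <;> tauto
  · rintro (⟨rfl, h⟩ | ⟨rfl, h | h⟩ | ⟨rfl, h⟩ | ⟨rfl, h⟩ | ⟨rfl, h | h⟩) <;>
      exact ⟨_, h, by tauto⟩

-- min? of an Int list equals a member below all members
theorem pvMin?_eq (l : List Int) (k : Int) (hk : k ∈ l) (hall : ∀ x ∈ l, k ≤ x) :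
    PySem.List.min? l (fun x => x) = some k := by
  cases h : PySem.List.min? l (fun x => x) with
  | none =>
    rw [PySem.List.min?_eq_none_iff] at h
    subst h; cases hk
  | some m =>
    have h1 := PySem.List.min?_mem h
    have h2 := PySem.List.min?_isMin h k hk
    have h3 := hall m h1
    simp only [Option.some_inj]
    omega

-- B's collect-all-hits-take-earliest equals A's ordered elif chain (JS markers)
theorem pvScanJS (t : String) :
    (match PySem.List.min? (((PySem.List.enumerate ["react", "vue", "angular", "@nestjs"]).filter
        (fun im => PySem.Str.isIn im.2 t)).map (·.1)) (fun x => x) with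
      | some i => PySem.List.pyGet? ["React", "Vue.js", "Angular", "NestJS"] i
      | none => some "Node.js") =
    (if PySem.Str.isIn "react" t then some "React"
     else if PySem.Str.isIn "vue" t then some "Vue.js"
     else if PySem.Str.isIn "angular" t then some "Angular"
     else if PySem.Str.isIn "@nestjs" t then some "NestJS"
     else some "Node.js") := by
  by_cases h1 : PySem.Str.isIn "react" t <;> by_cases h2 : PySem.Str.isIn "vue" t <;>
    by_cases h3 : PySem.Str.isIn "angular" t <;> by_cases h4 : PySem.Str.isIn "@nestjs" t <;>
    simp_all [PySem.List.enumerate, List.filter, PySem.List.min?, PySem.List.pyGet?,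
      PySem.List.pyIdx?]

-- B's collect-all-hits-take-earliest equals A's ordered elif chain (Python markers)
theorem pvScanPy (t : String) :
    (match PySem.List.min? (((PySem.List.enumerate ["django", "flask", "fastapi", "streamlit"]).filter
        (fun im => PySem.Str.isIn im.2 t)).map (·.1)) (fun x => x) with
      | some i => PySem.List.pyGet? ["Django", "Flask", "FastAPI", "Streamlit"] i
      | none => some "Python") =
    (if PySem.Str.isIn "django" t then some "Django"
     else if PySem.Str.isIn "flask" t then some "Flask"
     else if PySem.Str.isIn "fastapi" t then some "FastAPI"
     else if PySem.Str.isIn "streamlit" t then some "Streamlit"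
     else some "Python") := by
  by_cases h1 : PySem.Str.isIn "django" t <;> by_cases h2 : PySem.Str.isIn "flask" t <;>
    by_cases h3 : PySem.Str.isIn "fastapi" t <;> by_cases h4 : PySem.Str.isIn "streamlit" t <;>
    simp_all [PySem.List.enumerate, List.filter, PySem.List.min?, PySem.List.pyGet?,
      PySem.List.pyIdx?]

-- ===== VERDICT (by name: the statement is the Claim_ definition above) =====
set_option maxHeartbeats 1000000 in
theorem detect_framework_spec : Claim_equal_detect_framework := by
  intro files fc _
  unfold Spec_detect_framework detect_framework detect_framework_alt
  set fl := files.map PySem.Str.lower with hfl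
  have hc : ∀ y : String, PySem.Set.contains (PySem.Set.ofList fl) y = true ↔ y ∈ fl := by
    intro y; rw [PySem.Set.contains_iff, PySem.Set.mem_ofList]
  have hcf : ∀ y, y ∉ fl → PySem.Set.contains (PySem.Set.ofList fl) y = false := by
    intro y hy
    cases hb : PySem.Set.contains (PySem.Set.ofList fl) y
    · rfl
    · exact absurd ((hc y).mp hb) hy
  by_cases h0 : "package.json" ∈ fl
  · have hmin : PySem.List.min? (fl.filterMap fun g => PySem.Dict.get? pvPriority g)
        (fun x => x) = some 0 := by
      apply pvMin?_eq
      · exact (pvPrios_mem fl 0).mpr (Or.inl ⟨rfl, h0⟩)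
      · intro x hx
        rcases (pvPrios_mem fl x).mp hx with ⟨h, _⟩ | ⟨h, _⟩ | ⟨h, _⟩ | ⟨h, _⟩ | ⟨h, _⟩ <;> omega
    simp only [(hc _).mpr h0, if_true, hmin]
    rw [if_neg (by decide : ¬(2:Int) ≤ 0)]
    have hr : pvRules 0 = (["package.json"], ["react", "vue", "angular", "@nestjs"],
        ["React", "Vue.js", "Angular", "NestJS"], "Node.js") := by decide
    rw [hr]
    simp only [List.map, List.foldr, String.append_empty]
    exact (pvScanJS _).symm
  · by_cases h1 : "requirements.txt" ∈ fl ∨ "pyproject.toml" ∈ fl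
    · have hmin : PySem.List.min? (fl.filterMap fun g => PySem.Dict.get? pvPriority g)
          (fun x => x) = some 1 := by
        apply pvMin?_eq
        · exact (pvPrios_mem fl 1).mpr (Or.inr (Or.inl ⟨rfl, h1⟩))
        · intro x hx
          rcases (pvPrios_mem fl x).mp hx with ⟨_, hm⟩ | ⟨h, _⟩ | ⟨h, _⟩ | ⟨h, _⟩ | ⟨h, _⟩
          · exact absurd hm h0
          all_goals omega
      have hor : (PySem.Set.contains (PySem.Set.ofList fl) "requirements.txt" ||
          PySem.Set.contains (PySem.Set.ofList fl) "pyproject.toml") = true := by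
        simp only [Bool.or_eq_true, hc]; exact h1
      simp only [hcf _ h0, hor, hmin, if_true, Bool.false_eq_true, if_false]
      rw [if_neg (by decide : ¬(2:Int) ≤ 1)]
      have hr : pvRules 1 = (["requirements.txt", "pyproject.toml"],
          ["django", "flask", "fastapi", "streamlit"],
          ["Django", "Flask", "FastAPI", "Streamlit"], "Python") := by decide
      rw [hr]
      simp only [List.map, List.foldr, String.append_empty]
      exact (pvScanPy _).symm
    · push Not at h1
      obtain ⟨h1a, h1b⟩ := h1
      by_cases h2 : "cargo.toml" ∈ fl
      · have hmin : PySem.List.min? (fl.filterMap fun g => PySem.Dict.get? pvPriority g)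
            (fun x => x) = some 2 := by
          apply pvMin?_eq
          · exact (pvPrios_mem fl 2).mpr (Or.inr (Or.inr (Or.inl ⟨rfl, h2⟩)))
          · intro x hx
            rcases (pvPrios_mem fl x).mp hx with ⟨_, hm⟩ | ⟨_, hm | hm⟩ | ⟨h, _⟩ | ⟨h, _⟩ | ⟨h, _⟩
            · exact absurd hm h0
            · exact absurd hm h1a
            · exact absurd hm h1b
            all_goals omega
        simp only [hcf _ h0, hcf _ h1a, hcf _ h1b, (hc _).mpr h2, hmin, if_true,
          Bool.false_eq_true, if_false, Bool.or_self]
        rfl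
      · by_cases h3 : "go.mod" ∈ fl
        · have hmin : PySem.List.min? (fl.filterMap fun g => PySem.Dict.get? pvPriority g)
              (fun x => x) = some 3 := by
            apply pvMin?_eq
            · exact (pvPrios_mem fl 3).mpr (Or.inr (Or.inr (Or.inr (Or.inl ⟨rfl, h3⟩))))
            · intro x hx
              rcases (pvPrios_mem fl x).mp hx with ⟨_, hm⟩ | ⟨_, hm | hm⟩ | ⟨_, hm⟩ | ⟨h, _⟩ | ⟨h, _⟩
              · exact absurd hm h0
              · exact absurd hm h1a
              · exact absurd hm h1b
              · exact absurd hm h2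
              all_goals omega
          simp only [hcf _ h0, hcf _ h1a, hcf _ h1b, hcf _ h2, (hc _).mpr h3, hmin, if_true,
            Bool.false_eq_true, if_false, Bool.or_self]
          rfl
        · by_cases h4 : "pom.xml" ∈ fl ∨ "build.gradle" ∈ fl
          · have hmin : PySem.List.min? (fl.filterMap fun g => PySem.Dict.get? pvPriority g)
                (fun x => x) = some 4 := by
              apply pvMin?_eq
              · exact (pvPrios_mem fl 4).mpr (Or.inr (Or.inr (Or.inr (Or.inr ⟨rfl, h4⟩))))
              · intro x hx
                rcases (pvPrios_mem fl x).mp hx with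
                  ⟨_, hm⟩ | ⟨_, hm | hm⟩ | ⟨_, hm⟩ | ⟨_, hm⟩ | ⟨h, _⟩
                · exact absurd hm h0
                · exact absurd hm h1a
                · exact absurd hm h1b
                · exact absurd hm h2
                · exact absurd hm h3
                · omega
            have hor : (PySem.Set.contains (PySem.Set.ofList fl) "pom.xml" ||
                PySem.Set.contains (PySem.Set.ofList fl) "build.gradle") = true := by
              simp only [Bool.or_eq_true, hc]; exact h4
            simp only [hcf _ h0, hcf _ h1a, hcf _ h1b, hcf _ h2, hcf _ h3, hor, hmin, if_true,
              Bool.false_eq_true, if_false, Bool.or_self]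
            rfl
          · push Not at h4
            obtain ⟨h4a, h4b⟩ := h4
            have hnil : (fl.filterMap fun g => PySem.Dict.get? pvPriority g) = [] := by
              rw [List.eq_nil_iff_forall_not_mem]
              intro p hp
              rcases (pvPrios_mem fl p).mp hp with
                ⟨_, hm⟩ | ⟨_, hm | hm⟩ | ⟨_, hm⟩ | ⟨_, hm⟩ | ⟨_, hm | hm⟩
              · exact absurd hm h0
              · exact absurd hm h1a
              · exact absurd hm h1b
              · exact absurd hm h2
              · exact absurd hm h3
              · exact absurd hm h4a
              · exact absurd hm h4b
            have hmin : PySem.List.min? (fl.filterMap fun g => PySem.Dict.get? pvPriority g)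
                (fun x => x) = none := by
              rw [PySem.List.min?_eq_none_iff]; exact hnil
            simp only [hcf _ h0, hcf _ h1a, hcf _ h1b, hcf _ h2, hcf _ h3, hcf _ h4a, hcf _ h4b,
              hmin, Bool.false_eq_true, if_false, Bool.or_self]
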